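-- pv_equiv track=rewrite | github.com/Elijah-Huang/Competitive-Programming | Problems/Codeforces/Random/Global Rounds/Global Round 11/Unshuffling a Deck.py | update
-- ===== SOURCE A (Python) =====
-- def update(operations,c):
--     if operations is None:
--         return c
--     new = []
--     for i in operations:
--         new.append(c[:i])
--         c = c[i:]
--     c2 =[]
--     for i in range(len(new)-1,-1,-1):
--         c2.extend(new[i])
--     return c2
-- ===== SOURCE B (Python) =====
-- def update(operations, c):
--     if operations is None:
--         return c
--     n = len(c)
--     p = 0
--     bounds = []
--     for i in operations:
--         L = n - p
--         k = min(i, L) if i >= 0 else max(L + i, 0)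
--         bounds.append((p, p + k))
--         p += k
--     out = []
--     for a, b in reversed(bounds):
--         out.extend(c[a:b])
--     return out
-- ===== Notes on version B (the rewrite author's own statement) =====
-- stated objective: alternative
-- what changed: Instead of re-slicing and copying the remaining tail of c on every operation, B computes each segment's (start, end) index bounds in one arithmetic pass over operations and then slices the original list once per segment while concatenating in reverse.
import Mathlib
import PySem

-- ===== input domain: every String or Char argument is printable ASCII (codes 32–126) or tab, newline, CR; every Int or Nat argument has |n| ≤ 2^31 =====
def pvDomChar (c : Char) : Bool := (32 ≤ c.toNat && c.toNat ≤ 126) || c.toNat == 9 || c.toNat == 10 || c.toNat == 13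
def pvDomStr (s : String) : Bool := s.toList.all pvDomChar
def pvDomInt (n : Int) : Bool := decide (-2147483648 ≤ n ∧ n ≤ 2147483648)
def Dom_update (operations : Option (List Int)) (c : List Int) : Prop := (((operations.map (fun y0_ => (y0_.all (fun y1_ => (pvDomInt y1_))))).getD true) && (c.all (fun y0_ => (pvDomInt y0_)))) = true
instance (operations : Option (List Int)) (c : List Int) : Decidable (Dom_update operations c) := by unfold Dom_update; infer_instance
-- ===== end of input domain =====

-- B computes each segment's (start, end) index bounds in one arithmetic pass over the
-- operations and then slices the original list once per segment, instead of A's repeated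
-- re-slicing of the remaining tail (alternative structure; return value proved equal).

-- ===== PORT A =====
-- step of A's first loop: new.append(c[:i]); c = c[i:]
def updStepA (st : List (List Int) × List Int) (i : Int) : List (List Int) × List Int :=
  (st.1 ++ [PySem.List.slice st.2 none (some i)], PySem.List.slice st.2 (some i) none)

def update (operations : Option (List Int)) (c : List Int) : List Int :=
  match operations with
  | none => c
  | some ops =>
    let st := ops.foldl updStepA ([], c)
    -- for i in range(len(new)-1, -1, -1): c2.extend(new[i])
    (PySem.List.pyRange ((st.1.length : Int) - 1) (-1) (-1)).foldl
      (fun c2 i => c2 ++ (PySem.List.pyGet? st.1 i).getD []) []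

-- ===== PORT B =====
-- step of B's first loop over (bounds, p): k = min(i, L) if i >= 0 else max(L + i, 0)
def updStepB (n : Int) (st : List (Int × Int) × Int) (i : Int) : List (Int × Int) × Int :=
  let L := n - st.2
  let k := if 0 ≤ i then min i L else max (L + i) 0
  (st.1 ++ [(st.2, st.2 + k)], st.2 + k)

def update_alt (operations : Option (List Int)) (c : List Int) : List Int :=
  match operations with
  | none => c
  | some ops =>
    let st := ops.foldl (updStepB (c.length : Int)) ([], 0)
    st.1.reverse.foldl (fun out ab => out ++ PySem.List.slice c (some ab.1) (some ab.2)) []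

-- ===== PRECONDITION & SPEC =====
def Spec_update (operations : Option (List Int)) (c : List Int) (out : List Int) : Prop := out = update_alt operations c
instance (operations : Option (List Int)) (c : List Int) (out : List Int) : Decidable (Spec_update operations c out) := by unfold Spec_update; infer_instance

-- ===== CLAIM (what is proved, stated in full; the proofs are below) =====
def Claim_equal_update : Prop := ∀ (operations : Option (List Int)) (c : List Int), Dom_update operations c → Spec_update operations c (update operations c)

-- ===== LEMMAS AND PROOFS =====

-- the segment of c0 a recorded bound pair denotes
def seg (c0 : List Int) (ab : Int × Int) : List Int :=
  PySem.List.slice c0 (some ab.1) (some ab.2)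

-- the clamped slice length B computes
def kOf (i L : Int) : Int := if 0 ≤ i then min i L else max (L + i) 0

lemma kOf_nonneg (i L : Int) (hL : 0 ≤ L) : 0 ≤ kOf i L := by
  unfold kOf; split_ifs <;> omega

lemma kOf_le (i L : Int) (hL : 0 ≤ L) : kOf i L ≤ L := by
  unfold kOf; split_ifs <;> omega

lemma clampIdx_eq_kOf (m : Nat) (i : Int) :
    PySem.List.clampIdx m i = (kOf i (m : Int)).toNat := by
  unfold PySem.List.clampIdx kOf
  split_ifs <;> omega

lemma kOf_cast (c0 : List Int) (p : Nat) (i : Int) (hp : p ≤ c0.length) :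
    kOf i ((c0.length - p : Nat) : Int) = kOf i ((c0.length : Int) - p) := by
  congr 1; omega

-- (a) the segment A takes from the current tail equals the segment B's bounds denote
lemma sliceA_eq_seg (c0 : List Int) (p : Nat) (i : Int) (hp : p ≤ c0.length) :
    PySem.List.slice (c0.drop p) none (some i)
      = seg c0 ((p : Int), (p : Int) + kOf i ((c0.length : Int) - p)) := by
  have hL : (0:Int) ≤ (c0.length : Int) - p := by omega
  have hk0 : 0 ≤ kOf i ((c0.length : Int) - p) := kOf_nonneg _ _ hL
  unfold seg
  rw [PySem.List.slice_toNat c0 (by positivity) (by omega)]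
  unfold PySem.List.slice
  simp only [List.drop_zero, Nat.sub_zero]
  rw [clampIdx_eq_kOf, List.length_drop, kOf_cast c0 p i hp]
  have h1 : ((p:Int) + kOf i ((c0.length : Int) - p)).toNat - ((p:Int)).toNat
      = (kOf i ((c0.length : Int) - p)).toNat := by omega
  have h2 : ((p:Int)).toNat = p := by omega
  rw [h1, h2]

-- (b) A's new tail is a further drop of the original list
lemma sliceA_tail (c0 : List Int) (p : Nat) (i : Int) (hp : p ≤ c0.length) :
    PySem.List.slice (c0.drop p) (some i) none
      = c0.drop (p + (kOf i ((c0.length : Int) - p)).toNat) := by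
  rw [PySem.List.slice_some_none, clampIdx_eq_kOf, List.drop_drop, List.length_drop,
    kOf_cast c0 p i hp, Nat.add_comm]

lemma stepB_eq (n : Int) (b : List (Int × Int)) (p i : Int) :
    updStepB n (b, p) i = (b ++ [(p, p + kOf i (n - p))], p + kOf i (n - p)) := by
  simp [updStepB, kOf]

-- invariant of the two first loops: A's list of segments is the image of B's bounds
lemma loop_inv (c0 : List Int) (ops : List Int) :
    ∀ (p : Nat) (bAcc : List (Int × Int)), p ≤ c0.length →
      (ops.foldl updStepA (bAcc.map (seg c0), c0.drop p)).1
        = ((ops.foldl (updStepB (c0.length : Int)) (bAcc, (p : Int))).1).map (seg c0) := by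
  induction ops with
  | nil => intro p bAcc hp; simp
  | cons i ops ih =>
    intro p bAcc hp
    have hL : (0:Int) ≤ (c0.length : Int) - p := by omega
    have hk0 := kOf_nonneg i ((c0.length : Int) - p) hL
    have hkle := kOf_le i ((c0.length : Int) - p) hL
    set k := kOf i ((c0.length : Int) - p) with hk
    have hcast : (p : Int) + k = ((p + k.toNat : Nat) : Int) := by push_cast; omega
    have hstepA : updStepA (bAcc.map (seg c0), c0.drop p) i
        = ((bAcc ++ [((p : Int), (p : Int) + k)]).map (seg c0), c0.drop (p + k.toNat)) := by
      unfold updStepA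
      rw [sliceA_eq_seg c0 p i hp, sliceA_tail c0 p i hp]
      simp [← hk]
    have hstepB : updStepB (c0.length : Int) (bAcc, (p : Int)) i
        = (bAcc ++ [((p : Int), (p : Int) + k)], (p : Int) + k) := by
      rw [stepB_eq, ← hk]
    have hple : p + k.toNat ≤ c0.length := by omega
    have hrec := ih (p + k.toNat) (bAcc ++ [((p : Int), (p : Int) + k)]) hple
    simp only [List.foldl_cons, hstepA, hstepB]
    rw [hcast] at hrec ⊢
    exact hrec

-- the countdown range of A's second loop, as a reversed List.range
lemma pyRange_down (m : Nat) :
    PySem.List.pyRange ((m : Int) - 1) (-1) (-1)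
      = (List.range m).reverse.map (fun k => ((k : Nat) : Int)) := by
  unfold PySem.List.pyRange
  rw [if_neg (by decide), if_neg (by decide)]
  by_cases hm : m = 0
  · subst hm; norm_num
  · have hlt : (-1 : Int) < (m : Int) - 1 := by omega
    rw [if_pos hlt]
    have hcnt : ((((m : Int) - 1) - (-1) + -(-1) - 1) / -(-1)).toNat = m := by
      norm_num
    rw [hcnt, List.map_reverse]
    apply List.ext_getElem
    · simp
    · intro j h1 h2
      simp only [List.length_map, List.length_range] at h1 h2
      rw [List.getElem_reverse]
      simp only [List.getElem_map, List.getElem_range, List.length_map, List.length_range]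
      omega

-- A's second loop concatenates the segments in reverse
lemma foldl_countdown (new : List (List Int)) :
    ∀ (m : Nat) (acc : List Int), m ≤ new.length →
      (List.range m).reverse.foldl
          (fun c2 k => c2 ++ (PySem.List.pyGet? new ((k : Nat) : Int)).getD []) acc
        = acc ++ (new.take m).reverse.flatten := by
  intro m
  induction m with
  | zero => intro acc _; simp
  | succ m ih =>
    intro acc hm
    have hm' : m < new.length := by omega
    rw [List.range_succ, List.reverse_append, List.reverse_singleton, List.singleton_append,
      List.foldl_cons, ih (acc ++ (PySem.List.pyGet? new ((m : Nat) : Int)).getD []) (by omega),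
      PySem.List.pyGet?_natCast]
    have htake : new.take (m + 1) = new.take m ++ [new[m]] := by
      rw [List.take_add_one]
      simp [List.getElem?_eq_getElem hm']
    rw [htake, List.reverse_append]
    simp [List.getElem?_eq_getElem hm']

-- B's second loop concatenates the denoted segments in the order given
lemma foldl_extend (g : Int × Int → List Int) (l : List (Int × Int)) :
    ∀ (acc : List Int),
      l.foldl (fun out ab => out ++ g ab) acc = acc ++ (l.map g).flatten := by
  induction l with
  | nil => intro acc; simp
  | cons ab l ih => intro acc; simp [ih]

-- ===== VERDICT (by name: the statement is the Claim_ definition above) =====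
theorem update_spec : Claim_equal_update := by
  unfold Claim_equal_update Spec_update
  intro operations c _
  cases operations with
  | none => rfl
  | some ops =>
    show update (some ops) c = update_alt (some ops) c
    have hinv := loop_inv c ops 0 [] (by omega)
    simp only [List.map_nil, List.drop_zero, Int.natCast_zero] at hinv
    simp only [update, update_alt]
    rw [hinv, pyRange_down, List.foldl_map,
      foldl_countdown _ _ [] (le_refl _),
      foldl_extend (fun ab => PySem.List.slice c (some ab.1) (some ab.2)) _ []]
    rw [List.take_length]
    simp only [List.map_reverse]
    rfl
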